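-- pv_equiv track=rewrite | github.com/Amitha353/python_problem | quiz_06_profit.py | ck_profit
-- ===== SOURCE A (Python) =====
-- def ck_profit(ary, cpc, sp, cl):
--     tp = 0
--     tc = 0
--     for a in ary:
--         b = a
--         r = b % cl
--         p = int(b / cl)
--         c = p - 1
--         if r > 0:
--             c = p
--         tp += p
--         tc += c
--     pof = tp * int(sp) * cl - tc * int(cpc)
--     return tp, tc, pof
-- ===== SOURCE B (Python) =====
-- def ck_profit(ary, cpc, sp, cl):
--     # Group identical values with a frequency dict: each distinct value is
--     # divided once and its contribution weighted by its multiplicity.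
--     freq = {}
--     for a in ary:
--         freq[a] = freq.get(a, 0) + 1
--     tp = 0
--     tc = 0
--     for v, n in freq.items():
--         p = int(v / cl)
--         c = p if v % cl > 0 else p - 1
--         tp += n * p
--         tc += n * c
--     return tp, tc, tp * int(sp) * cl - tc * int(cpc)
-- ===== Notes on version B (the rewrite author's own statement) =====
-- stated objective: alternative
-- what changed: B first builds a frequency dict of the values, then computes quotient and remainder once per DISTINCT value and weights the contribution by its multiplicity, instead of A's per-element accumulation over the whole list.
-- outside the precondition, e.g. on ck_profit([1], 0, 0, 0): A raises ZeroDivisionError, B raises ZeroDivisionError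
import Mathlib
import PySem

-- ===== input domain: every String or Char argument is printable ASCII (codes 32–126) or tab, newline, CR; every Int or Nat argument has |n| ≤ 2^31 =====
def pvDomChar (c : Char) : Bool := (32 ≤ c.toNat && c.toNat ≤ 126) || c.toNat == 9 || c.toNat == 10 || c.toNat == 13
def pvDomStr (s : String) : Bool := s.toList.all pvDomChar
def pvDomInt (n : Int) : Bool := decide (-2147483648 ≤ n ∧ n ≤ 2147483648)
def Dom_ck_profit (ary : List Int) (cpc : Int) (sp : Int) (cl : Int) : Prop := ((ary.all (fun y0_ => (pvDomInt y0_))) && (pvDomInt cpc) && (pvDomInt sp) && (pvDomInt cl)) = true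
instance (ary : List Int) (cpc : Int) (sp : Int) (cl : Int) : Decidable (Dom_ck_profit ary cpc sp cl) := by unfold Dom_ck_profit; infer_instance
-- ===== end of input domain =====

-- B groups the input into a frequency dict and computes quotient/remainder once per
-- distinct value, weighting by multiplicity, instead of A's per-element accumulation.

-- ===== PORT A =====
-- int(b / cl) on this domain (|b|,|cl| ≤ 2^31 < 2^53) is exactly PySem.Int.truncdiv.
def ck_profit (ary : List Int) (cpc : Int) (sp : Int) (cl : Int) : Int × Int × Int :=
  let s := ary.foldl (fun (st : Int × Int) a =>
    let b := a
    let r := PySem.Int.mod b cl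
    let p := PySem.Int.truncdiv b cl
    let c := p - 1
    let c := if r > 0 then p else c
    (st.1 + p, st.2 + c)) (0, 0)
  let pof := s.1 * sp * cl - s.2 * cpc
  (s.1, s.2, pof)

-- ===== PORT B =====
def ck_profit_alt (ary : List Int) (cpc : Int) (sp : Int) (cl : Int) : Int × Int × Int :=
  let freq := ary.foldl (fun (d : PySem.Dict Int Int) a => d.insert a (d.getD a 0 + 1)) PySem.Dict.empty
  let s := freq.items.foldl (fun (st : Int × Int) vn =>
    let p := PySem.Int.truncdiv vn.1 cl
    let c := if PySem.Int.mod vn.1 cl > 0 then p else p - 1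
    (st.1 + vn.2 * p, st.2 + vn.2 * c)) (0, 0)
  (s.1, s.2, s.1 * sp * cl - s.2 * cpc)

-- ===== PRECONDITION & SPEC =====
-- Pre_ excludes exactly the inputs where A raises ZeroDivisionError: cl = 0 with a nonempty ary.
def Pre_ck_profit (ary : List Int) (cpc : Int) (sp : Int) (cl : Int) : Prop := cl ≠ 0 ∨ ary = []
instance (ary : List Int) (cpc : Int) (sp : Int) (cl : Int) : Decidable (Pre_ck_profit ary cpc sp cl) := by unfold Pre_ck_profit; infer_instance
def pvWitness_ck_profit : List Int × Int × Int × Int := ([7, -3, 10, 7], 2, 5, 3)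
def Spec_ck_profit (ary : List Int) (cpc : Int) (sp : Int) (cl : Int) (out : Int × Int × Int) : Prop := out = ck_profit_alt ary cpc sp cl
instance (ary : List Int) (cpc : Int) (sp : Int) (cl : Int) (out : Int × Int × Int) : Decidable (Spec_ck_profit ary cpc sp cl out) := by unfold Spec_ck_profit; infer_instance

-- ===== CLAIM =====
def Claim_equal_ck_profit : Prop := ∀ (ary : List Int) (cpc : Int) (sp : Int) (cl : Int), Dom_ck_profit ary cpc sp cl → Pre_ck_profit ary cpc sp cl → Spec_ck_profit ary cpc sp cl (ck_profit ary cpc sp cl)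

-- ===== LEMMAS AND PROOFS =====

def pvQuot (cl a : Int) : Int := PySem.Int.truncdiv a cl
def pvCost (cl a : Int) : Int := if PySem.Int.mod a cl > 0 then pvQuot cl a else pvQuot cl a - 1

theorem A_fold (cl : Int) (l : List Int) : ∀ s t : Int,
    l.foldl (fun (st : Int × Int) a =>
      let b := a
      let r := PySem.Int.mod b cl
      let p := PySem.Int.truncdiv b cl
      let c := p - 1
      let c := if r > 0 then p else c
      (st.1 + p, st.2 + c)) (s, t)
    = (s + (l.map (pvQuot cl)).sum, t + (l.map (pvCost cl)).sum) := by
  induction l with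
  | nil => intro s t; simp
  | cons a l ih =>
    intro s t
    simp only [List.foldl_cons, List.map_cons, List.sum_cons, ih, pvQuot, pvCost]
    rw [Prod.mk.injEq]
    constructor <;> ring

theorem B_fold (cl : Int) (l : List (Int × Int)) : ∀ s t : Int,
    l.foldl (fun (st : Int × Int) vn =>
      let p := PySem.Int.truncdiv vn.1 cl
      let c := if PySem.Int.mod vn.1 cl > 0 then p else p - 1
      (st.1 + vn.2 * p, st.2 + vn.2 * c)) (s, t)
    = (s + (l.map (fun vn => vn.2 * pvQuot cl vn.1)).sum,
       t + (l.map (fun vn => vn.2 * pvCost cl vn.1)).sum) := by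
  induction l with
  | nil => intro s t; simp
  | cons a l ih =>
    intro s t
    simp only [List.foldl_cons, List.map_cons, List.sum_cons, ih, pvQuot, pvCost]
    rw [Prod.mk.injEq]
    constructor <;> ring

theorem sum_map_ite_single (w : Int → Int) (a : Int) : ∀ (S : List Int), S.Nodup → a ∈ S →
    (S.map (fun k => if k = a then w k else 0)).sum = w a := by
  intro S
  induction S with
  | nil => simp
  | cons b S ih =>
    intro hnd hmem
    rcases List.nodup_cons.mp hnd with ⟨hb, hnd'⟩
    rcases List.mem_cons.mp hmem with heq | hma
    · subst heq
      have h0 : ∀ x ∈ S.map (fun k => if k = a then w k else 0), x = 0 := by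
        intro x hx
        rcases List.mem_map.mp hx with ⟨k, hk, rfl⟩
        simp [show k ≠ a from fun h => hb (h ▸ hk)]
      simp [List.sum_eq_zero h0]
    · have hba : b ≠ a := fun h => hb (h ▸ hma)
      simp [hba, ih hnd' hma]

-- weighted sum over any nodup superset of the support = plain sum over the list
theorem weighted_count_sum (g : Int → Int) : ∀ (l S : List Int), S.Nodup → (∀ x ∈ l, x ∈ S) →
    (S.map (fun k => (l.count k : Int) * g k)).sum = (l.map g).sum := by
  intro l
  induction l with
  | nil => intro S _ _; simp
  | cons a l ih =>
    intro S hnd hsub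
    have hsplit : (S.map (fun k => ((a :: l).count k : Int) * g k)).sum
        = (S.map (fun k => (l.count k : Int) * g k)).sum
          + (S.map (fun k => if k = a then g k else 0)).sum := by
      rw [← List.sum_map_add]
      apply congrArg
      apply List.map_congr_left
      intro k _
      simp only [List.count_cons]
      by_cases hk : k = a
      · subst hk; simp; ring
      · simp [hk, Ne.symm hk]
    rw [hsplit, ih S hnd (fun x hx => hsub x (by simp [hx])),
        sum_map_ite_single g a S hnd (hsub a (by simp))]
    simp only [List.map_cons, List.sum_cons]
    ring

-- ===== VERDICT =====
theorem ck_profit_spec : Claim_equal_ck_profit := by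
  intro ary cpc sp cl _ _
  unfold Spec_ck_profit
  simp only [ck_profit, ck_profit_alt,
    PySem.Dict.foldl_insert_getD_add_one_eq_counter, PySem.Dict.items_counter,
    A_fold, B_fold, List.map_map]
  have hmem : ∀ x ∈ ary, x ∈ PySem.Set.ofList ary := by
    intro x hx; rw [PySem.Set.mem_ofList]; exact hx
  have h1 := weighted_count_sum (pvQuot cl) ary (PySem.Set.ofList ary)
      (PySem.Set.nodup_ofList ary) hmem
  have h2 := weighted_count_sum (pvCost cl) ary (PySem.Set.ofList ary)
      (PySem.Set.nodup_ofList ary) hmem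
  simp only [Function.comp_def, zero_add]
  rw [← h1, ← h2]
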